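-- pv_equiv track=rewrite | github.com/ruhollahmozafari/homework | time execution.py | zero_one_digit_counter_str
-- ===== SOURCE A (Python) =====
-- def digit_adder(number):
--     if number < 10 :
--         return number
--     else:
--         string_number=str(number)
--         sum_up=0
--         for item in string_number:
--             sum_up += int(item)
--         return digit_adder(sum_up)
--
-- def zero_one_digit_counter_str(start, stop):
--     list1=[]
--     list2=[]
--     for number in range(start , stop):
--         if digit_adder(number)==1:
--             list1.append(number)
--         elif digit_adder(number)==2:
--             list2.append(number)
--     return len(list1) , len(list2)
-- ===== SOURCE B (Python) =====
-- def zero_one_digit_counter_str(start, stop):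
--     # Closed form: for n >= 1 the digital root is 1 + (n-1) % 9, and for n < 10
--     # it is n itself; so the counts are counts of residues 1 and 2 mod 9 among
--     # the integers of [max(start,1), stop).
--     lo = max(start, 1)
--     hi = max(stop, lo)
--     count1 = (hi + 7) // 9 - (lo + 7) // 9
--     count2 = (hi + 6) // 9 - (lo + 6) // 9
--     return count1, count2
-- ===== Notes on version B (the rewrite author's own statement) =====
-- stated objective: faster
-- what changed: B replaces A's loop over the whole range (with a recursive string-based digit-sum per number) by a closed-form count of residues 1 and 2 mod 9 using the digital-root formula, two floor divisions per count.
import Mathlib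
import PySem

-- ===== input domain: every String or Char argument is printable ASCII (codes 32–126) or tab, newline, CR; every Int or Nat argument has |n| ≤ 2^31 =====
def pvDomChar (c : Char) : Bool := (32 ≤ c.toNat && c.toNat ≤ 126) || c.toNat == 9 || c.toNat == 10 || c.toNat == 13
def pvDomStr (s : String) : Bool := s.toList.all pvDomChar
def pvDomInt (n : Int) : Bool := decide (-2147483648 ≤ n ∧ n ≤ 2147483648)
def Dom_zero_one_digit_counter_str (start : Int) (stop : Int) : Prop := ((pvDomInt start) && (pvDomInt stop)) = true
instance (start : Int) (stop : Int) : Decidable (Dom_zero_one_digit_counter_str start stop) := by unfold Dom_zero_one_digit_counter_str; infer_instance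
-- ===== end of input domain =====

-- B replaces A's per-number recursive string digit summing over the whole range by the
-- closed-form count of residues 1 and 2 mod 9 (digital root formula); objective: faster.

-- ===== PORT A =====
-- the inner loop of digit_adder: 'for item in string_number: sum_up += int(item)';
-- int(item) never raises here (digit_adder only reaches the loop for number >= 10,
-- so str(number) consists of digits), hence .getD 0 is unreachable
def pvDigitSumStr (number : Int) : Int :=
  (PySem.Int.toStr number).toList.foldl
    (fun sum_up item => sum_up + (PySem.Int.ofStr? (String.ofList [item])).getD 0) 0

-- digit_adder via fuel (the digit sum of number >= 10 is strictly smaller, so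
-- fuel number.toNat suffices and the fuel-exhaustion branch is unreachable)
def digitAdderFuel : Nat → Int → Int
  | 0, number => number
  | fuel+1, number =>
    if number < 10 then number
    else digitAdderFuel fuel (pvDigitSumStr number)

def digit_adder (number : Int) : Int := digitAdderFuel number.toNat number

def zero_one_digit_counter_str (start : Int) (stop : Int) : List Int :=
  let p := (PySem.List.pyRange start stop).foldl
    (fun (p : List Int × List Int) number =>
      if digit_adder number == 1 then (p.1 ++ [number], p.2)
      else if digit_adder number == 2 then (p.1, p.2 ++ [number])
      else p) ([], [])
  [PySem.List.len p.1, PySem.List.len p.2]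

-- ===== PORT B =====
def zero_one_digit_counter_str_alt (start : Int) (stop : Int) : List Int :=
  let lo := max start 1
  let hi := max stop lo
  [PySem.Int.floordiv (hi + 7) 9 - PySem.Int.floordiv (lo + 7) 9,
   PySem.Int.floordiv (hi + 6) 9 - PySem.Int.floordiv (lo + 6) 9]

-- ===== PRECONDITION & SPEC =====
def Spec_zero_one_digit_counter_str (start : Int) (stop : Int) (out : List Int) : Prop := out = zero_one_digit_counter_str_alt start stop
instance (start : Int) (stop : Int) (out : List Int) : Decidable (Spec_zero_one_digit_counter_str start stop out) := by unfold Spec_zero_one_digit_counter_str; infer_instance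

-- ===== CLAIM (what is proved, stated in full; the proofs are below) =====
def Claim_equal_zero_one_digit_counter_str : Prop := ∀ (start : Int) (stop : Int), Dom_zero_one_digit_counter_str start stop → Spec_zero_one_digit_counter_str start stop (zero_one_digit_counter_str start stop)

-- ===== LEMMAS AND PROOFS =====

-- core's Nat.toDigits agrees with Mathlib's Nat.digits (reversed, as characters)
lemma pv_toDigitsCore_eq : ∀ (f n : Nat) (l : List Char), 0 < n → n ≤ f →
    Nat.toDigitsCore 10 f n l = ((Nat.digits 10 n).map Nat.digitChar).reverse ++ l := by
  intro f
  induction f with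
  | zero => intro n l h1 h2; omega
  | succ f ih =>
    intro n l h1 h2
    rw [Nat.toDigitsCore]
    rw [Nat.digits_def' (by norm_num : 1 < 10) h1]
    by_cases h : n / 10 = 0
    · have : Nat.digits 10 (n / 10) = [] := by rw [h]; simp
      simp [h]
    · have hlt : n / 10 < n := Nat.div_lt_self h1 (by norm_num)
      rw [if_neg h, ih (n / 10) _ (Nat.pos_of_ne_zero h) (by omega)]
      simp

lemma pv_ofStr_digitChar (d : Nat) (h : d < 10) :
    PySem.Int.ofStr? (String.ofList [Nat.digitChar d]) = some (d : Int) := by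
  interval_cases d <;> decide

lemma pv_foldl_digitChars (ds : List Nat) (h : ∀ d ∈ ds, d < 10) : ∀ (init : Int),
    ((ds.map Nat.digitChar).reverse).foldl
      (fun sum_up item => sum_up + (PySem.Int.ofStr? (String.ofList [item])).getD 0) init
    = init + (ds.sum : Int) := by
  induction ds with
  | nil => intro init; simp
  | cons d ds ih =>
    intro init
    simp only [List.map_cons, List.reverse_cons, List.foldl_append, List.foldl_cons, List.foldl_nil]
    rw [ih (fun x hx => h x (List.mem_cons_of_mem _ hx)) init,
        pv_ofStr_digitChar d (h d (List.mem_cons_self ..))]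
    simp only [Option.getD_some, List.sum_cons]
    push_cast
    ring

lemma pv_digits_sum_le : ∀ n : Nat, (Nat.digits 10 n).sum ≤ n := by
  intro n
  induction n using Nat.strong_induction_on with
  | _ n ih =>
    rcases Nat.eq_zero_or_pos n with h | h
    · simp [h]
    · rw [Nat.digits_def' (by norm_num : 1 < 10) h]
      have hlt : n / 10 < n := Nat.div_lt_self h (by norm_num)
      have := ih (n / 10) hlt
      simp only [List.sum_cons]
      omega

lemma pv_digits_sum_lt (n : Nat) (h : 10 ≤ n) : (Nat.digits 10 n).sum < n := by
  rw [Nat.digits_def' (by norm_num : 1 < 10) (by omega)]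
  have := pv_digits_sum_le (n / 10)
  simp only [List.sum_cons]
  omega

lemma pv_digits_sum_pos (n : Nat) (h : 0 < n) : 0 < (Nat.digits 10 n).sum := by
  have hne : Nat.digits 10 n ≠ [] := Nat.digits_ne_nil_iff_ne_zero.mpr (by omega)
  have hlast := Nat.getLast_digit_ne_zero 10 (show n ≠ 0 by omega)
  have hmem : (Nat.digits 10 n).getLast hne ∈ Nat.digits 10 n := List.getLast_mem hne
  have := List.single_le_sum (fun (x : Nat) _ => Nat.zero_le x) _ hmem
  omega

lemma pv_digitSum_eq (n : Int) (h : 10 ≤ n) :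
    pvDigitSumStr n = ((Nat.digits 10 n.toNat).sum : Int) := by
  unfold pvDigitSumStr
  rw [PySem.Int.toList_toStr]
  have hneg : ¬ n < 0 := by omega
  rw [show PySem.Int.toChars n = Nat.toDigits 10 n.toNat by simp [PySem.Int.toChars, hneg]]
  rw [Nat.toDigits, pv_toDigitsCore_eq (n.toNat + 1) n.toNat [] (by omega) (by omega)]
  rw [List.append_nil,
      pv_foldl_digitChars _ (fun d hd => Nat.digits_lt_base (by norm_num) hd) 0]
  ring

lemma pv_digitAdderFuel_eq : ∀ (f : Nat) (n : Int), 1 ≤ n → n.toNat ≤ f →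
    digitAdderFuel f n = 1 + (n - 1) % 9 := by
  intro f
  induction f with
  | zero => intro n h1 h2; omega
  | succ f ih =>
    intro n h1 h2
    rw [digitAdderFuel]
    by_cases hlt : n < 10
    · rw [if_pos hlt]; omega
    · rw [if_neg hlt]
      have h10 : 10 ≤ n := by omega
      have hs := pv_digitSum_eq n h10
      have hpos := pv_digits_sum_pos n.toNat (by omega)
      have hlt' := pv_digits_sum_lt n.toNat (by omega)
      have hmod := Nat.modEq_nine_digits_sum n.toNat
      rw [Nat.ModEq] at hmod
      rw [ih (pvDigitSumStr n) (by omega) (by omega), hs]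
      omega

lemma pv_dr_eq (n : Int) : digit_adder n = if 1 ≤ n then 1 + (n - 1) % 9 else n := by
  by_cases h : 1 ≤ n
  · rw [if_pos h]
    exact pv_digitAdderFuel_eq n.toNat n h le_rfl
  · rw [if_neg h]
    have h0 : n.toNat = 0 := by omega
    rw [digit_adder, h0, digitAdderFuel]

lemma pv_dr_one (n : Int) : (digit_adder n == 1) = decide (1 ≤ n ∧ n % 9 = 1) := by
  rw [pv_dr_eq, Bool.eq_iff_iff]
  split_ifs with h <;> simp only [beq_iff_eq, decide_eq_true_eq] <;> omega

lemma pv_dr_two (n : Int) : (digit_adder n == 2) = decide (1 ≤ n ∧ n % 9 = 2) := by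
  rw [pv_dr_eq, Bool.eq_iff_iff]
  split_ifs with h <;> simp only [beq_iff_eq, decide_eq_true_eq] <;> omega

lemma pv_foldl_lists : ∀ (xs : List Int) (a b : List Int),
    xs.foldl (fun (p : List Int × List Int) number =>
      if digit_adder number == 1 then (p.1 ++ [number], p.2)
      else if digit_adder number == 2 then (p.1, p.2 ++ [number])
      else p) (a, b)
    = (a ++ xs.filter (fun x => digit_adder x == 1),
       b ++ xs.filter (fun x => digit_adder x == 2)) := by
  intro xs
  induction xs with
  | nil => intro a b; simp
  | cons x xs ih =>
    intro a b
    simp only [List.foldl_cons, List.filter_cons]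
    by_cases h1 : digit_adder x == 1
    · have h2 : (digit_adder x == 2) = false := by
        rw [beq_iff_eq] at h1; simp [h1]
      rw [if_pos h1, ih]
      simp [h1, h2]
    · by_cases h2 : digit_adder x == 2
      · rw [if_neg h1, if_pos h2, ih]
        simp [h1, h2]
      · rw [if_neg h1, if_neg h2, ih]
        simp [h1, h2]

lemma pv_count_res (r : Int) (h1 : 1 ≤ r) (h2 : r ≤ 2) : ∀ (k : Nat) (start : Int),
    (((PySem.List.pyRange start (start + k)).filter
        (fun x => decide (1 ≤ x ∧ x % 9 = r))).length : Int)
    = (max (start + k) (max start 1) + 8 - r) / 9 - (max start 1 + 8 - r) / 9 := by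
  intro k
  induction k with
  | zero =>
    intro start
    rw [show ((0 : Nat) : Int) = 0 by rfl]
    rw [PySem.List.pyRange_one_eq_nil (by omega)]
    simp only [List.filter_nil, List.length_nil, Int.natCast_zero]
    omega
  | succ k ih =>
    intro start
    rw [show (start + ((k + 1 : Nat) : Int)) = (start + k) + 1 by push_cast; ring]
    rw [PySem.List.pyRange_one_succ_right (by omega)]
    rw [List.filter_append, List.length_append]
    push_cast
    rw [ih start]
    by_cases h : (1 ≤ start + (k : Int) ∧ (start + (k : Int)) % 9 = r) <;>
      simp [h] <;> omega

lemma pv_count_res' (r : Int) (h1 : 1 ≤ r) (h2 : r ≤ 2) (start stop : Int) :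
    (((PySem.List.pyRange start stop).filter
        (fun x => decide (1 ≤ x ∧ x % 9 = r))).length : Int)
    = (max stop (max start 1) + 8 - r) / 9 - (max start 1 + 8 - r) / 9 := by
  rcases le_or_gt stop start with h | h
  · rw [PySem.List.pyRange_one_eq_nil h]
    simp only [List.filter_nil, List.length_nil, Int.natCast_zero]
    omega
  · have hk := pv_count_res r h1 h2 (stop - start).toNat start
    rw [show start + (((stop - start).toNat : Nat) : Int) = stop by omega] at hk
    exact hk

lemma pv_floordiv9 (a : Int) : PySem.Int.floordiv a 9 = a / 9 := by
  simp only [PySem.Int.floordiv]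
  rw [Int.fdiv_eq_ediv]
  norm_num

-- ===== VERDICT (by name: the statement is the Claim_ definition above) =====
theorem zero_one_digit_counter_str_spec : Claim_equal_zero_one_digit_counter_str := by
  intro start stop _
  unfold Spec_zero_one_digit_counter_str zero_one_digit_counter_str zero_one_digit_counter_str_alt
  rw [pv_foldl_lists]
  simp only [List.nil_append, PySem.List.len_eq]
  rw [show (fun x => digit_adder x == 1) = (fun x => decide (1 ≤ x ∧ x % 9 = 1)) from
        funext pv_dr_one,
      show (fun x => digit_adder x == 2) = (fun x => decide (1 ≤ x ∧ x % 9 = 2)) from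
        funext pv_dr_two]
  simp only [List.cons.injEq, and_true]
  refine ⟨?_, ?_⟩
  · rw [pv_count_res' 1 (by omega) (by omega) start stop, pv_floordiv9, pv_floordiv9]
    omega
  · rw [pv_count_res' 2 (by omega) (by omega) start stop, pv_floordiv9, pv_floordiv9]
    omega
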